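-- pv_equiv track=rewrite | github.com/DKNY1201/programming-python | String/LookAndSay.py | get_next_val
-- ===== SOURCE A (Python) =====
-- def get_next_val(s):
--     count = 1
--     l = len(s)
--     res = ""
--
--     for i in range(1, l + 1):
--         if i == l or s[i] != s[i - 1]:
--             res += str(count) + str(s[i - 1])
--             count = 1
--         else:
--             count += 1
--
--     return res
-- ===== SOURCE B (Python) =====
-- def get_next_val(s):
--     if not s:
--         return ""
--     n = len(s)
--     bounds = [0] + [i for i in range(1, n) if s[i] != s[i - 1]] + [n]
--     return "".join(str(b - a) + s[a] for a, b in zip(bounds, bounds[1:]))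
-- ===== Notes on version B (the rewrite author's own statement) =====
-- stated objective: alternative
-- what changed: B replaces A's single counting pass (a run counter reset at each change, flushed via a virtual end position) by a staged boundary computation: it first builds the list of change positions [i for i in range(1,n) if s[i]!=s[i-1]] framed by 0 and n, then emits str(b-a)+s[a] for each pair of consecutive boundaries.
import Mathlib
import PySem

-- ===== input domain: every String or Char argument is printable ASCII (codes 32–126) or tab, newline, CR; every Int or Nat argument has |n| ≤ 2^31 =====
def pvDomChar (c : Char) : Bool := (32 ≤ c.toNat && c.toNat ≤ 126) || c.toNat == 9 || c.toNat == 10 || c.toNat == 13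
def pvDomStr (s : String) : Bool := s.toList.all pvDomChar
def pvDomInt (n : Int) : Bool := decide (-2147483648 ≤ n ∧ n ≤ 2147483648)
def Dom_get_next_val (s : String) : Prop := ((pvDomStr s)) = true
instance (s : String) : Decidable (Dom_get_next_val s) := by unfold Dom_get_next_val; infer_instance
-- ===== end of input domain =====

-- B replaces A's single counting pass by a staged boundary computation: first the list of
-- positions where the character changes, then pairwise differences of consecutive boundaries.

-- ===== PORT A =====
-- str(s[i-1]) : s[i-1] is always in range for i in 1..l, so the none branch below is
-- unreachable; it is only there to make the match total.
def get_next_val (s : String) : String :=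
  let l : Int := PySem.Str.len s
  ((PySem.List.pyRange 1 (l + 1) 1).foldl
    (fun (st : Int × String) (i : Int) =>
      if i = l ∨ PySem.Str.pyGet? s i ≠ PySem.Str.pyGet? s (i - 1) then
        (1, st.2 ++ PySem.Int.toStr st.1 ++
          (match PySem.Str.pyGet? s (i - 1) with
           | some c => String.ofList [c]
           | none => ""))
      else (st.1 + 1, st.2))
    (1, "")).2

-- ===== PORT B =====
-- 'bounds[1:]' is bounds.tail; the comprehension filters range(1, n); each joined piece is
-- str(b - a) + s[a] (s[a] always in range, the none branch is only there to make the match total).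
def get_next_val_alt (s : String) : String :=
  if s.toList = [] then "" else
  let n : Int := PySem.Str.len s
  let bounds : List Int :=
    0 :: (PySem.List.pyRange 1 n 1).filter
      (fun i => PySem.Str.pyGet? s i != PySem.Str.pyGet? s (i - 1)) ++ [n]
  PySem.Str.join "" ((bounds.zip bounds.tail).map (fun ab =>
    PySem.Int.toStr (ab.2 - ab.1) ++
      (match PySem.Str.pyGet? s ab.1 with
       | some c => String.ofList [c]
       | none => "")))

-- ===== PRECONDITION & SPEC =====
def Spec_get_next_val (s : String) (out : String) : Prop := out = get_next_val_alt s
instance (s : String) (out : String) : Decidable (Spec_get_next_val s out) := by unfold Spec_get_next_val; infer_instance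

-- ===== CLAIM (what is proved, stated in full; the proofs are below) =====
def Claim_equal_get_next_val : Prop := ∀ (s : String), Dom_get_next_val s → Spec_get_next_val s (get_next_val s)

-- ===== LEMMAS AND PROOFS =====

-- canonical run-length chunks of the look-and-say step, used to characterise BOTH ports
def pvChunks : List Char → List String
  | [] => []
  | c :: rest =>
    (PySem.Int.toStr (((rest.takeWhile (· == c)).length : Int) + 1) ++ String.ofList [c])
      :: pvChunks (rest.drop (rest.takeWhile (· == c)).length)
termination_by l => l.length
decreasing_by simp

-- the characters of the joined chunk list
def pvOut (l : List String) : List Char := (l.map String.toList).flatten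

-- ---------- A-side characterisation ----------

-- A's remaining output, as structural recursion over the remaining characters
def specA : List Char → Char → Int → List Char
  | [], prev, count => PySem.Int.toChars count ++ [prev]
  | c :: t, prev, count =>
    if c ≠ prev then PySem.Int.toChars count ++ [prev] ++ specA t c 1
    else specA t prev (count + 1)

theorem specA_eq (t : List Char) (prev : Char) (count : Int) :
    specA t prev count =
      PySem.Int.toChars (count + ((t.takeWhile (· == prev)).length : Int)) ++
        prev :: pvOut (pvChunks (t.drop (t.takeWhile (· == prev)).length)) := by
  induction t generalizing prev count with
  | nil => simp [specA, pvChunks, pvOut]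
  | cons c t ih =>
    by_cases h : c = prev
    · subst h
      rw [show specA (c :: t) c count = specA t c (count + 1) by simp [specA]]
      rw [ih]
      simp
      ring_nf
    · rw [show specA (c :: t) prev count = PySem.Int.toChars count ++ [prev] ++ specA t c 1 by
        simp [specA, h]]
      rw [ih]
      rw [show (c :: t).takeWhile (· == prev) = [] by simp [h]]
      simp [pvChunks, pvOut]
      rw [add_comm]

theorem foldA (cs : List Char) (a : Nat) (prev : Char) (count : Int) (res : String)
    (ha : 1 ≤ a) (hle : a ≤ cs.length) (hprev : cs[a - 1]? = some prev) :
    (((PySem.List.pyRange (a : Int) ((cs.length : Int) + 1) 1).foldl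
      (fun (st : Int × String) (i : Int) =>
        if i = (cs.length : Int) ∨ PySem.List.pyGet? cs i ≠ PySem.List.pyGet? cs (i - 1) then
          (1, st.2 ++ PySem.Int.toStr st.1 ++
            (match PySem.List.pyGet? cs (i - 1) with
             | some c => String.ofList [c]
             | none => ""))
        else (st.1 + 1, st.2))
      (count, res)).2).toList = res.toList ++ specA (cs.drop a) prev count := by
  induction hn : cs.length - a generalizing a prev count res with
  | zero =>
    have ha' : a = cs.length := by omega
    subst ha'
    rw [PySem.List.pyRange_one_singleton]
    have hidx : ((cs.length : Int) - 1) = ((cs.length - 1 : Nat) : Int) := by omega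
    simp [List.foldl, hidx, hprev, specA]
  | succ n ih =>
    have hlt : a < cs.length := by omega
    obtain ⟨c, hc⟩ : ∃ c, cs[a]? = some c := ⟨cs[a], by simp [hlt]⟩
    have hca : cs[a] = c := by simpa [List.getElem?_eq_getElem, hlt] using hc
    have hdrop : cs.drop a = c :: cs.drop (a + 1) := by
      rw [List.drop_eq_getElem_cons hlt, hca]
    rw [PySem.List.pyRange_one_cons (by omega)]
    rw [List.foldl_cons]
    have hidx : ((a : Int) - 1) = ((a - 1 : Nat) : Int) := by omega
    have hne : ¬ ((a : Int) = (cs.length : Int)) := by omega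
    have hprev' : cs[(a + 1) - 1]? = some c := by simpa using hc
    by_cases hcp : c = prev
    · have hcond : ¬ ((a : Int) = (cs.length : Int) ∨
          PySem.List.pyGet? cs (a : Int) ≠ PySem.List.pyGet? cs ((a : Int) - 1)) := by
        simp [hne, hidx, hc, hprev, hcp]
      rw [if_neg hcond]
      have h1 : ((a : Int) + 1) = (((a + 1 : Nat)) : Int) := by omega
      rw [h1, ih (a + 1) c (count + 1) res (by omega) (by omega) hprev' (by omega)]
      rw [hdrop, hcp]
      simp [specA]
    · have hcond : ((a : Int) = (cs.length : Int) ∨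
          PySem.List.pyGet? cs (a : Int) ≠ PySem.List.pyGet? cs ((a : Int) - 1)) := by
        simp [hne, hidx, hc, hprev, hcp]
      rw [if_pos hcond]
      have h1 : ((a : Int) + 1) = (((a + 1 : Nat)) : Int) := by omega
      rw [h1, ih (a + 1) c 1 _ (by omega) (by omega) hprev' (by omega)]
      rw [hdrop]
      simp [specA, hcp, hidx, hprev]

theorem join_empty (l : List (List Char)) : List.intercalate [] l = l.flatten := by
  induction l with
  | nil => simp [List.intercalate]
  | cons x l ih => cases l <;> simp_all [List.intercalate, List.intersperse, List.flatten]

-- ---------- B-side characterisation ----------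

-- Nat-level mirrors of B's staged data
def pvCutsN (cs : List Char) : List Nat :=
  (List.range' 1 (cs.length - 1)).filter (fun i => decide (cs[i]? ≠ cs[i - 1]?))

def pvBoundsN (cs : List Char) : List Nat := 0 :: pvCutsN cs ++ [cs.length]

def pvPairs (L : List Nat) : List (Nat × Nat) := L.zip L.tail

def pvFBN (cs : List Char) (p : Nat × Nat) : List Char :=
  PySem.Int.toChars ((p.2 : Int) - (p.1 : Int)) ++
    (match cs[p.1]? with | some c => [c] | none => [])

theorem drop_takeWhile (p : Char → Bool) (t : List Char) :
    t.drop (t.takeWhile p).length = t.dropWhile p := by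
  conv_lhs => rw [show t.drop (t.takeWhile p).length
    = (t.takeWhile p ++ t.dropWhile p).drop (t.takeWhile p).length by
      rw [List.takeWhile_append_dropWhile]]
  rw [List.drop_left]

theorem tw_dw_length (c : Char) (t : List Char) :
    t.length = (t.takeWhile (· == c)).length + (t.dropWhile (· == c)).length := by
  have h := congrArg List.length (List.takeWhile_append_dropWhile (p := (· == c)) (l := t))
  simp only [List.length_append] at h
  omega

theorem run_get (c : Char) (t : List Char) (i : Nat)
    (h : i ≤ (t.takeWhile (· == c)).length) : (c :: t)[i]? = some c := by
  cases i with
  | zero => simp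
  | succ j =>
    have hj : j < (t.takeWhile (· == c)).length := by omega
    have ht : t[j]? = (t.takeWhile (· == c))[j]? := by
      conv_lhs => rw [← List.takeWhile_append_dropWhile (p := (· == c)) (l := t)]
      rw [List.getElem?_append_left hj]
    have hmem : (t.takeWhile (· == c))[j] ∈ t.takeWhile (· == c) := List.getElem_mem _
    have := List.mem_takeWhile_imp hmem
    simp only [beq_iff_eq] at this
    simp [ht, hj, this]


theorem pvCutsN_cons (c : Char) (t : List Char) :
    pvCutsN (c :: t) =
      if t.dropWhile (· == c) = [] then []
      else ((t.takeWhile (· == c)).length + 1) ::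
        (pvCutsN (t.dropWhile (· == c))).map (((t.takeWhile (· == c)).length + 1) + ·) := by
  have hlen := tw_dw_length c t
  have hsplit : List.range' 1 ((t.takeWhile (· == c)).length + (t.dropWhile (· == c)).length)
      = List.range' 1 (t.takeWhile (· == c)).length
        ++ List.range' (1 + (t.takeWhile (· == c)).length) (t.dropWhile (· == c)).length :=
    (List.range'_append_1).symm
  have h1 : ((List.range' 1 (t.takeWhile (· == c)).length).filter
      (fun i => decide ((c :: t)[i]? ≠ (c :: t)[i - 1]?))) = [] := by
    rw [List.filter_eq_nil_iff]
    intro i hi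
    have hi' : 1 ≤ i ∧ i < 1 + (t.takeWhile (· == c)).length := by
      simpa [List.mem_range'_1] using hi
    have e1 : (c :: t)[i]? = some c := run_get c t i (by omega)
    have e2 : (c :: t)[i - 1]? = some c := run_get c t (i - 1) (by omega)
    simp [e1, e2]
  unfold pvCutsN
  simp only [List.length_cons, Nat.add_sub_cancel]
  rw [show t.length = (t.takeWhile (· == c)).length + (t.dropWhile (· == c)).length from hlen]
  rw [hsplit, List.filter_append, h1, List.nil_append]
  by_cases hm0 : (t.dropWhile (· == c)).length = 0
  · have hrnil : t.dropWhile (· == c) = [] := List.length_eq_zero_iff.mp hm0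
    rw [if_pos hrnil, hm0]
    simp
  · have hrne : t.dropWhile (· == c) ≠ [] := fun hcon => hm0 (by rw [hcon]; rfl)
    obtain ⟨r0, rt, hr⟩ : ∃ r0 rt, t.dropWhile (· == c) = r0 :: rt := by
      cases hrc : t.dropWhile (· == c) with
      | nil => exact absurd hrc hrne
      | cons a b => exact ⟨a, b, rfl⟩
    have hr0c : r0 ≠ c := by
      have := List.head?_dropWhile_not (· == c) t
      rw [hr] at this
      simp only [List.head?_cons] at this
      simpa using this
    have hTrest : ∀ j : Nat, t[(t.takeWhile (· == c)).length + j]? = (t.dropWhile (· == c))[j]? := by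
      intro j
      rw [← drop_takeWhile (· == c) t, List.getElem?_drop]
    have hstep : List.range' (1 + (t.takeWhile (· == c)).length) (t.dropWhile (· == c)).length
        = ((t.takeWhile (· == c)).length + 1)
          :: List.range' ((t.takeWhile (· == c)).length + 2) ((t.dropWhile (· == c)).length - 1) := by
      have h2 := @List.range'_succ ((t.takeWhile (· == c)).length + 1)
        ((t.dropWhile (· == c)).length - 1) 1
      rw [show ((t.dropWhile (· == c)).length - 1) + 1 = (t.dropWhile (· == c)).length from by omega,
        show (t.takeWhile (· == c)).length + 1 + 1 = (t.takeWhile (· == c)).length + 2 from by omega]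
        at h2
      rw [Nat.add_comm 1 (t.takeWhile (· == c)).length]
      exact h2
    rw [hstep, List.filter_cons]
    have hatK1 : (c :: t)[(t.takeWhile (· == c)).length + 1]? = some r0 := by
      have h' : (c :: t)[(t.takeWhile (· == c)).length + 1]? = t[(t.takeWhile (· == c)).length]? := by
        simp
      rw [h', show (t.takeWhile (· == c)).length = (t.takeWhile (· == c)).length + 0 from rfl,
        hTrest 0, hr]
      rfl
    have hatK : (c :: t)[(t.takeWhile (· == c)).length]? = some c := run_get c t _ le_rfl
    have hcut : (decide ((c :: t)[(t.takeWhile (· == c)).length + 1]?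
        ≠ (c :: t)[(t.takeWhile (· == c)).length + 1 - 1]?)) = true := by
      rw [decide_eq_true_iff]
      rw [show (t.takeWhile (· == c)).length + 1 - 1 = (t.takeWhile (· == c)).length from rfl]
      rw [hatK1, hatK]
      simp [hr0c]
    rw [if_pos hcut]
    have hmapr : List.range' ((t.takeWhile (· == c)).length + 2) ((t.dropWhile (· == c)).length - 1)
        = (List.range' 1 ((t.dropWhile (· == c)).length - 1)).map
            (((t.takeWhile (· == c)).length + 1) + ·) := by
      rw [List.range'_eq_map_range, List.range'_eq_map_range, List.map_map]
      apply List.map_congr_left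
      intro x _
      simp; omega
    rw [hmapr, List.filter_map]
    simp only [Function.comp_def]
    have hfc : ∀ j ∈ List.range' 1 ((t.dropWhile (· == c)).length - 1),
        (decide ((c :: t)[(t.takeWhile (· == c)).length + 1 + j]?
            ≠ (c :: t)[(t.takeWhile (· == c)).length + 1 + j - 1]?))
          = decide ((t.dropWhile (· == c))[j]? ≠ (t.dropWhile (· == c))[j - 1]?) := by
      intro j hj
      have hj' : 1 ≤ j ∧ j < 1 + ((t.dropWhile (· == c)).length - 1) := by
        simpa [List.mem_range'_1] using hj
      have e1 : (c :: t)[(t.takeWhile (· == c)).length + 1 + j]? = (t.dropWhile (· == c))[j]? := by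
        rw [show (t.takeWhile (· == c)).length + 1 + j
          = ((t.takeWhile (· == c)).length + j) + 1 from by omega]
        simp only [List.getElem?_cons_succ]
        exact hTrest j
      have e2 : (c :: t)[(t.takeWhile (· == c)).length + 1 + j - 1]?
          = (t.dropWhile (· == c))[j - 1]? := by
        rw [show (t.takeWhile (· == c)).length + 1 + j - 1
          = ((t.takeWhile (· == c)).length + (j - 1)) + 1 from by omega]
        simp only [List.getElem?_cons_succ]
        exact hTrest (j - 1)
      rw [e1, e2]
    rw [List.filter_congr hfc, if_neg hrne]

theorem pvBoundsN_cons (c : Char) (t : List Char) (h : t.dropWhile (· == c) ≠ []) :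
    pvBoundsN (c :: t) =
      0 :: (pvBoundsN (t.dropWhile (· == c))).map (((t.takeWhile (· == c)).length + 1) + ·) := by
  have hlen := tw_dw_length c t
  unfold pvBoundsN
  rw [pvCutsN_cons, if_neg h]
  simp only [List.cons_append, List.map_cons, List.map_append, List.map_nil,
    List.length_cons, Nat.add_zero]
  rw [hlen, show (t.takeWhile (· == c)).length + (t.dropWhile (· == c)).length + 1
    = (t.takeWhile (· == c)).length + 1 + (t.dropWhile (· == c)).length from by omega]

theorem pvPairs_map (f : Nat → Nat) (L : List Nat) :
    pvPairs (L.map f) = (pvPairs L).map (Prod.map f f) := by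
  unfold pvPairs
  rw [← List.map_tail, List.zip_map]

theorem pvFBN_shift (c : Char) (t : List Char) (p : Nat × Nat) :
    pvFBN (c :: t) (Prod.map (((t.takeWhile (· == c)).length + 1) + ·)
        (((t.takeWhile (· == c)).length + 1) + ·) p)
      = pvFBN (t.dropWhile (· == c)) p := by
  obtain ⟨a, b⟩ := p
  unfold pvFBN
  have e1 : (((((t.takeWhile (· == c)).length + 1) + b : Nat)) : Int)
      - ((((t.takeWhile (· == c)).length + 1) + a : Nat) : Int) = (b : Int) - a := by
    push_cast; ring
  have e2 : (c :: t)[((t.takeWhile (· == c)).length + 1) + a]? = (t.dropWhile (· == c))[a]? := by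
    rw [show ((t.takeWhile (· == c)).length + 1) + a
      = ((t.takeWhile (· == c)).length + a) + 1 from by omega]
    simp only [List.getElem?_cons_succ]
    rw [← drop_takeWhile (· == c) t, List.getElem?_drop]
  simp only [Prod.map, e1, e2]

theorem pairs_chunks : ∀ (n : Nat) (cs : List Char), cs.length = n → cs ≠ [] →
    ((pvPairs (pvBoundsN cs)).map (pvFBN cs)).flatten = pvOut (pvChunks cs) := by
  intro n
  induction n using Nat.strong_induction_on with
  | _ n ih =>
    intro cs hn hne
    obtain ⟨c, t, rfl⟩ : ∃ c t, cs = c :: t := by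
      cases cs with
      | nil => exact absurd rfl hne
      | cons a b => exact ⟨a, b, rfl⟩
    have hchunks : pvChunks (c :: t)
        = (PySem.Int.toStr (((t.takeWhile (· == c)).length : Int) + 1) ++ String.ofList [c])
            :: pvChunks (t.dropWhile (· == c)) := by
      rw [pvChunks, drop_takeWhile]
    by_cases hr : t.dropWhile (· == c) = []
    · have hcuts : pvCutsN (c :: t) = [] := by rw [pvCutsN_cons, if_pos hr]
      have hlen : t.length = (t.takeWhile (· == c)).length := by
        have h := tw_dw_length c t
        rw [hr] at h
        simpa using h
      have hb : pvBoundsN (c :: t) = [0, (t.takeWhile (· == c)).length + 1] := by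
        unfold pvBoundsN
        rw [hcuts]
        simp [hlen]
      rw [hb, hchunks, hr]
      simp [pvPairs, pvFBN, pvOut, pvChunks, PySem.Int.toList_toStr]
    · have hrlen : (t.dropWhile (· == c)).length < n := by
        have h1 : (t.dropWhile (· == c)).length ≤ t.length := List.length_dropWhile_le _ _
        simp at hn; omega
      have hIH := ih _ hrlen (t.dropWhile (· == c)) rfl hr
      rw [pvBoundsN_cons c t hr]
      have hbr : pvBoundsN (t.dropWhile (· == c))
          = 0 :: (pvCutsN (t.dropWhile (· == c)) ++ [(t.dropWhile (· == c)).length]) := rfl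
      rw [hbr]
      simp only [List.map_cons]
      rw [show pvPairs (0 :: (((t.takeWhile (· == c)).length + 1) + 0) ::
            (pvCutsN (t.dropWhile (· == c)) ++ [(t.dropWhile (· == c)).length]).map
              (((t.takeWhile (· == c)).length + 1) + ·))
          = (0, ((t.takeWhile (· == c)).length + 1) + 0) ::
            pvPairs (((((t.takeWhile (· == c)).length + 1) + 0)) ::
            (pvCutsN (t.dropWhile (· == c)) ++ [(t.dropWhile (· == c)).length]).map
              (((t.takeWhile (· == c)).length + 1) + ·)) from rfl]
      rw [show (((((t.takeWhile (· == c)).length + 1) + 0)) ::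
            (pvCutsN (t.dropWhile (· == c)) ++ [(t.dropWhile (· == c)).length]).map
              (((t.takeWhile (· == c)).length + 1) + ·))
          = (pvBoundsN (t.dropWhile (· == c))).map (((t.takeWhile (· == c)).length + 1) + ·) from by
        rw [hbr]; rfl]
      rw [pvPairs_map]
      rw [List.map_cons, List.map_map]
      have hcomp : (pvFBN (c :: t) ∘ Prod.map (((t.takeWhile (· == c)).length + 1) + ·)
            (((t.takeWhile (· == c)).length + 1) + ·))
          = pvFBN (t.dropWhile (· == c)) := by
        funext p
        exact pvFBN_shift c t p
      rw [hcomp, List.flatten_cons, hIH, hchunks]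
      have hhead : pvFBN (c :: t) (0, ((t.takeWhile (· == c)).length + 1) + 0)
          = PySem.Int.toChars (((t.takeWhile (· == c)).length : Int) + 1) ++ [c] := by
        unfold pvFBN
        simp
      rw [hhead]
      simp [pvOut, PySem.Int.toList_toStr]

-- B's output characters equal the canonical chunk characters
theorem alt_chars (s : String) :
    (get_next_val_alt s).toList = pvOut (pvChunks s.toList) := by
  by_cases hnil : s.toList = []
  · rw [get_next_val_alt, if_pos hnil, hnil]
    simp [pvChunks, pvOut]
  · have hn1 : 1 ≤ s.toList.length := by
      cases hc : s.toList with
      | nil => exact absurd hc hnil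
      | cons a b => simp

    have hrange : PySem.List.pyRange 1 (s.toList.length : Int) 1
        = (List.range' 1 (s.toList.length - 1)).map (fun x : Nat => (x : Int)) := by
      rw [PySem.List.pyRange_one, List.range'_eq_map_range, List.map_map]
      rw [show ((s.toList.length : Int) - 1).toNat = s.toList.length - 1 from by omega]
      apply List.map_congr_left
      intro x _
      simp
    have hfilter : (PySem.List.pyRange 1 (s.toList.length : Int) 1).filter
          (fun i => PySem.Str.pyGet? s i != PySem.Str.pyGet? s (i - 1))
        = (pvCutsN s.toList).map (fun x : Nat => (x : Int)) := by
      rw [hrange, List.filter_map]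
      unfold pvCutsN
      congr 1
      apply List.filter_congr
      intro i hi
      have hi' : 1 ≤ i ∧ i < 1 + (s.toList.length - 1) := by
        simpa [List.mem_range'_1] using hi
      have e1 : PySem.Str.pyGet? s ((i : Nat) : Int) = s.toList[i]? := by
        simp [PySem.Str.pyGet?]
      have e2 : PySem.Str.pyGet? s (((i : Nat) : Int) - 1) = s.toList[i - 1]? := by
        rw [show ((i : Nat) : Int) - 1 = ((i - 1 : Nat) : Int) from by omega]
        simp [PySem.Str.pyGet?]
      simp only [Function.comp_def, e1, e2]
      apply Bool.eq_iff_iff.mpr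
      simp [bne_iff_ne]
    have hjoin : ∀ l : List String, (PySem.Str.join "" l).toList = pvOut l := by
      intro l
      simp [PySem.Chars.join, join_empty, pvOut]
    rw [get_next_val_alt, if_neg hnil]
    simp only [PySem.Str.len_eq, hfilter]
    have hbounds : ((0 : Int) :: (pvCutsN s.toList).map (fun x : Nat => (x : Int)))
          ++ [(s.toList.length : Int)]
        = (pvBoundsN s.toList).map (fun x : Nat => (x : Int)) := by
      unfold pvBoundsN
      simp
    simp only [hbounds]
    rw [show ((pvBoundsN s.toList).map (fun x : Nat => (x : Int))).zip
          (((pvBoundsN s.toList).map (fun x : Nat => (x : Int))).tail)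
        = (pvPairs (pvBoundsN s.toList)).map
            (Prod.map (fun x : Nat => (x : Int)) (fun x : Nat => (x : Int))) from by
      unfold pvPairs
      rw [← List.map_tail, List.zip_map]]
    rw [List.map_map, hjoin, pvOut, List.map_map]
    have hfn : (String.toList ∘ ((fun ab : Int × Int =>
          PySem.Int.toStr (ab.2 - ab.1) ++
            (match PySem.Str.pyGet? s ab.1 with
             | some c => String.ofList [c]
             | none => "")) ∘ Prod.map (fun x : Nat => (x : Int)) (fun x : Nat => (x : Int))))
        = pvFBN s.toList := by
      funext p
      obtain ⟨a, b⟩ := p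
      unfold pvFBN
      have e : PySem.Str.pyGet? s ((a : Nat) : Int) = s.toList[a]? := by
        simp [PySem.Str.pyGet?]
      simp only [Function.comp_def, Prod.map, e]
      cases s.toList[a]? <;> simp [PySem.Int.toList_toStr]
    rw [hfn]
    exact pairs_chunks s.toList.length s.toList rfl hnil

-- ===== VERDICT (by name: the statement is the Claim_ definition above) =====
theorem get_next_val_spec : Claim_equal_get_next_val := by
  intro s _
  unfold Spec_get_next_val
  apply String.toList_injective
  rw [alt_chars]
  cases hcs : s.toList with
  | nil =>
    simp [get_next_val, PySem.Str.len, hcs, PySem.List.pyRange_one_eq_nil, pvChunks, pvOut]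
  | cons c t =>
    have hA := foldA s.toList 1 c 1 "" (by omega) (by rw [hcs]; simp) (by rw [hcs]; simp)
    simp [get_next_val, PySem.Str.len, hcs] at hA ⊢
    rw [hA, specA_eq]
    simp [pvChunks, pvOut]
    rw [Int.add_comm]
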